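-- pv_equiv track=rewrite | github.com/franko14/icon-ruc | test_schema_fixes.py | fix_ensemble_statistics
-- ===== SOURCE A (Python) =====
-- from typing import Dict, Any
--
-- def fix_ensemble_statistics(statistics: Dict[str, Any]) -> Dict[str, Any]:
--     """Fix ensemble statistics by removing variable prefixes"""
--     fixed_stats = {}
--
--     # Mapping from prefixed names to clean names
--     field_mappings = {
--         'tp_mean': 'mean',
--         'tp_median': 'median',
--         'tp_std': 'std',
--         'tp_min': 'min',
--         'tp_max': 'max',
--         'vmax_mean': 'mean',
--         'vmax_median': 'median',
--         'vmax_std': 'std',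
--         'vmax_min': 'min',
--         'vmax_max': 'max'
--     }
--
--     for old_key, values in statistics.items():
--         # Map prefixed names to clean names
--         if old_key in field_mappings:
--             new_key = field_mappings[old_key]
--             fixed_stats[new_key] = values
--         # Keep percentile keys as they are (tp_05 -> p05, tp_95 -> p95, etc.)
--         elif old_key.startswith(('tp_', 'vmax_')):
--             # Extract percentile number and create clean percentile key
--             percentile = old_key.split('_')[1]  # Extract "05", "95", etc.
--             if percentile.isdigit():
--                 new_key = f'p{percentile}'
--                 fixed_stats[new_key] = values
--             else:
--                 # Keep other fields as-is
--                 fixed_stats[old_key] = values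
--         else:
--             # Keep non-prefixed fields as-is
--             fixed_stats[old_key] = values
--
--     return fixed_stats
-- ===== SOURCE B (Python) =====
-- def _strip(key, suffix):
--     if suffix in ('mean', 'median', 'std', 'min', 'max'):
--         return suffix
--     head = suffix.split('_')[0]
--     return 'p' + head if head.isdigit() else key
--
--
-- def _clean_key(key):
--     if key.startswith('tp_'):
--         return _strip(key, key[3:])
--     if key.startswith('vmax_'):
--         return _strip(key, key[5:])
--     return key
--
--
-- def fix_ensemble_statistics(statistics):
--     return {_clean_key(key): values for key, values in statistics.items()}
-- ===== Notes on version B (the rewrite author's own statement) =====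
-- stated objective: simpler
-- what changed: B drops the 10-entry field_mappings lookup table and instead parses each key directly: strip the 'tp_'/'vmax_' prefix, return the suffix if it is a statistic name, else 'p'+leading digit group, else the key unchanged.
import Mathlib
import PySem

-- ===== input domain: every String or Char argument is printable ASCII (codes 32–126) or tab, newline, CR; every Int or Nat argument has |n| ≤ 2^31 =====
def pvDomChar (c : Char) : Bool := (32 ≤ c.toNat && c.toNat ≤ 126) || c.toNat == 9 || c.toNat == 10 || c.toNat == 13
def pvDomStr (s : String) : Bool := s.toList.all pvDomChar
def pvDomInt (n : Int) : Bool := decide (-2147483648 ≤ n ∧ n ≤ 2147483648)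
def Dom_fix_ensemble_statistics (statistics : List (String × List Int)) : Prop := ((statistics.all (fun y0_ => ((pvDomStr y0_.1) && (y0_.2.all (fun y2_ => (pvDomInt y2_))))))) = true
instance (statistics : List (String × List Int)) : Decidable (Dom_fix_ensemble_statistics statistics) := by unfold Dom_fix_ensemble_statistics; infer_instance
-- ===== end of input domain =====

-- B replaces A's 10-entry field_mappings dict with direct key parsing (strip the prefix,
-- recognise the statistic suffix or the leading digit group): simpler, no table.


-- ===== PORT A =====
def fieldMappings : PySem.Dict String String :=
  PySem.Dict.ofList [("tp_mean", "mean"), ("tp_median", "median"), ("tp_std", "std"),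
    ("tp_min", "min"), ("tp_max", "max"), ("vmax_mean", "mean"), ("vmax_median", "median"),
    ("vmax_std", "std"), ("vmax_min", "min"), ("vmax_max", "max")]

def fix_ensemble_statistics (statistics : List (String × List Int)) : List (String × List Int) :=
  (statistics.foldl (fun fixed_stats p =>
      let old_key := p.1
      let values := p.2
      if fieldMappings.contains old_key then
        -- field_mappings[old_key] cannot raise: membership was just checked
        fixed_stats.insert ((fieldMappings.get? old_key).getD "") values
      else if PySem.Str.startswith old_key "tp_" || PySem.Str.startswith old_key "vmax_" then
        -- old_key.split('_')[1]: index 1 exists because old_key starts with 'tp_'/'vmax_'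
        let percentile := ((PySem.Str.split? old_key "_").getD []).getD 1 ""
        if PySem.Str.strIsdigit percentile then
          fixed_stats.insert ("p" ++ percentile) values
        else
          fixed_stats.insert old_key values
      else
        fixed_stats.insert old_key values)
    PySem.Dict.empty).items

-- ===== PORT B =====
def pvStrip (key suffix : String) : String :=
  if ["mean", "median", "std", "min", "max"].contains suffix then suffix
  else
    -- suffix.split('_')[0]: str.split always returns a nonempty list
    let head := ((PySem.Str.split? suffix "_").getD []).getD 0 ""
    if PySem.Str.strIsdigit head then "p" ++ head else key

def pvCleanKey (key : String) : String :=
  if PySem.Str.startswith key "tp_" then pvStrip key (PySem.Str.slice key (some 3) none)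
  else if PySem.Str.startswith key "vmax_" then pvStrip key (PySem.Str.slice key (some 5) none)
  else key

def fix_ensemble_statistics_alt (statistics : List (String × List Int)) : List (String × List Int) :=
  (statistics.foldl (fun fixed p => fixed.insert (pvCleanKey p.1) p.2) PySem.Dict.empty).items

-- ===== PRECONDITION & SPEC =====
def Spec_fix_ensemble_statistics (statistics : List (String × List Int)) (out : List (String × List Int)) : Prop := out = fix_ensemble_statistics_alt statistics
instance (statistics : List (String × List Int)) (out : List (String × List Int)) : Decidable (Spec_fix_ensemble_statistics statistics out) := by unfold Spec_fix_ensemble_statistics; infer_instance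

-- ===== CLAIM (what is proved, stated in full; the proofs are below) =====
def Claim_equal_fix_ensemble_statistics : Prop := ∀ (statistics : List (String × List Int)), Dom_fix_ensemble_statistics statistics → Spec_fix_ensemble_statistics statistics (fix_ensemble_statistics statistics)

-- ===== LEMMAS AND PROOFS =====

-- A's per-key decision, factored out of its loop body
def aKeyFun (old_key : String) : String :=
  if fieldMappings.contains old_key then (fieldMappings.get? old_key).getD ""
  else if PySem.Str.startswith old_key "tp_" || PySem.Str.startswith old_key "vmax_" then
    let percentile := ((PySem.Str.split? old_key "_").getD []).getD 1 ""
    if PySem.Str.strIsdigit percentile then "p" ++ percentile else old_key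
  else old_key

-- specification of PySem.Chars.splitOn for the one-character separator '_'
def mySplit : List Char → List (List Char)
  | [] => [[]]
  | c :: r => if c = '_' then [] :: mySplit r else (mySplit r).modifyHead (c :: ·)

theorem mySplit_ne_nil (l : List Char) : mySplit l ≠ [] := by
  induction l with
  | nil => simp [mySplit]
  | cons c r ih =>
    simp only [mySplit]
    split
    · simp
    · cases h : mySplit r with
      | nil => exact absurd h ih
      | cons a t => simp

theorem go_eq (l : List Char) : ∀ (fuel : Nat) (cur : List Char) (acc : List (List Char)),
    l.length ≤ fuel →
    PySem.Chars.splitOn.go ['_'] fuel l cur acc = acc.reverse ++ (mySplit l).modifyHead (cur.reverse ++ ·) := by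
  induction l with
  | nil =>
    intro fuel cur acc _
    cases fuel <;> simp [PySem.Chars.splitOn.go, mySplit]
  | cons c r ih =>
    intro fuel cur acc hf
    cases fuel with
    | zero => simp at hf
    | succ f =>
      simp only [PySem.Chars.splitOn.go]
      by_cases hc : c = '_'
      · subst hc
        rw [if_pos (by simp [List.isPrefixOf])]
        simp only [List.length_singleton, List.drop_succ_cons, List.drop_zero]
        rw [ih f [] (cur.reverse :: acc) (by simpa using hf)]
        simp [mySplit]
        cases h : mySplit r with
        | nil => exact absurd h (mySplit_ne_nil r)
        | cons a t => simp
      · rw [if_neg (by simp [List.isPrefixOf]; exact fun h => absurd h.symm hc)]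
        rw [ih f (c :: cur) acc (by simpa using Nat.le_of_succ_le_succ hf)]
        simp only [mySplit, if_neg hc]
        cases h : mySplit r with
        | nil => exact absurd h (mySplit_ne_nil r)
        | cons a t => simp

theorem splitOn_us (cs : List Char) : PySem.Chars.splitOn cs ['_'] = mySplit cs := by
  rw [PySem.Chars.splitOn, go_eq cs (cs.length + 1) [] [] (by omega)]
  cases h : mySplit cs with
  | nil => exact absurd h (mySplit_ne_nil cs)
  | cons a t => simp

-- splitting off a separator-free prefix followed by '_'
theorem split1_eq (pre r : List Char) (hpre : '_' ∉ pre) :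
    mySplit (pre ++ '_' :: r) = pre :: mySplit r := by
  induction pre with
  | nil => simp [mySplit]
  | cons c cs ih =>
    simp only [List.mem_cons, not_or] at hpre
    simp only [List.cons_append, mySplit]
    rw [if_neg (fun h => hpre.1 h.symm), ih (by simpa using hpre.2)]
    simp

theorem us_toList : ("_" : String).toList = ['_'] := by decide

theorem split?_ofList (cs : List Char) :
    PySem.Str.split? (String.ofList cs) "_" = some ((mySplit cs).map String.ofList) := by
  simp [PySem.Str.split?, PySem.Chars.split?, us_toList, splitOn_us]

theorem slice3 (r : List Char) :
    PySem.Str.slice (String.ofList ('t' :: 'p' :: '_' :: r)) (some 3) none = String.ofList r := by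
  simp [PySem.Str.slice, PySem.Chars.slice, PySem.List.slice_from]

theorem slice5 (r : List Char) :
    PySem.Str.slice (String.ofList ('v' :: 'm' :: 'a' :: 'x' :: '_' :: r)) (some 5) none = String.ofList r := by
  simp [PySem.Str.slice, PySem.Chars.slice, PySem.List.slice_from]

theorem sw_tp (r : List Char) :
    PySem.Str.startswith (String.ofList ('t' :: 'p' :: '_' :: r)) "tp_" = true := by
  simp [PySem.Str.startswith, PySem.Chars.startswith, List.isPrefixOf]

theorem sw_vmax (r : List Char) :
    PySem.Str.startswith (String.ofList ('v' :: 'm' :: 'a' :: 'x' :: '_' :: r)) "vmax_" = true := by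
  simp [PySem.Str.startswith, PySem.Chars.startswith, List.isPrefixOf]

theorem sw_tp_of_vmax (r : List Char) :
    PySem.Str.startswith (String.ofList ('v' :: 'm' :: 'a' :: 'x' :: '_' :: r)) "tp_" = false := by
  simp [PySem.Str.startswith, PySem.Chars.startswith, List.isPrefixOf]

theorem key_eq_tp (r : List Char) :
    aKeyFun (String.ofList ('t' :: 'p' :: '_' :: r)) = pvCleanKey (String.ofList ('t' :: 'p' :: '_' :: r)) := by
  by_cases h1 : r = "mean".toList
  · subst h1; decide
  by_cases h2 : r = "median".toList
  · subst h2; decide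
  by_cases h3 : r = "std".toList
  · subst h3; decide
  by_cases h4 : r = "min".toList
  · subst h4; decide
  by_cases h5 : r = "max".toList
  · subst h5; decide
  have hkeys : fieldMappings.keys = ["tp_mean", "tp_median", "tp_std", "tp_min", "tp_max", "vmax_mean", "vmax_median", "vmax_std", "vmax_min", "vmax_max"] := by decide
  have hcont : fieldMappings.contains (String.ofList ('t' :: 'p' :: '_' :: r)) = false := by
    rw [PySem.Dict.contains_eq_decide_mem_keys, hkeys]
    simp only [List.mem_cons, List.not_mem_nil, or_false, decide_eq_false_iff_not, not_or]
    refine ⟨?_, ?_, ?_, ?_, ?_, ?_, ?_, ?_, ?_, ?_⟩ <;> intro h <;>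
        have ht := congrArg String.toList h <;> simp only [String.toList_ofList] at ht
    · rw [show ("tp_mean" : String).toList = ['t', 'p', '_', 'm', 'e', 'a', 'n'] from by decide] at ht
      simp only [List.cons.injEq, true_and] at ht
      exact h1 (by rw [show ("mean" : String).toList = ['m', 'e', 'a', 'n'] from by decide]; exact ht)
    · rw [show ("tp_median" : String).toList = ['t', 'p', '_', 'm', 'e', 'd', 'i', 'a', 'n'] from by decide] at ht
      simp only [List.cons.injEq, true_and] at ht
      exact h2 (by rw [show ("median" : String).toList = ['m', 'e', 'd', 'i', 'a', 'n'] from by decide]; exact ht)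
    · rw [show ("tp_std" : String).toList = ['t', 'p', '_', 's', 't', 'd'] from by decide] at ht
      simp only [List.cons.injEq, true_and] at ht
      exact h3 (by rw [show ("std" : String).toList = ['s', 't', 'd'] from by decide]; exact ht)
    · rw [show ("tp_min" : String).toList = ['t', 'p', '_', 'm', 'i', 'n'] from by decide] at ht
      simp only [List.cons.injEq, true_and] at ht
      exact h4 (by rw [show ("min" : String).toList = ['m', 'i', 'n'] from by decide]; exact ht)
    · rw [show ("tp_max" : String).toList = ['t', 'p', '_', 'm', 'a', 'x'] from by decide] at ht
      simp only [List.cons.injEq, true_and] at ht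
      exact h5 (by rw [show ("max" : String).toList = ['m', 'a', 'x'] from by decide]; exact ht)
    · rw [show ("vmax_mean" : String).toList = ['v', 'm', 'a', 'x', '_', 'm', 'e', 'a', 'n'] from by decide] at ht
      simp at ht
    · rw [show ("vmax_median" : String).toList = ['v', 'm', 'a', 'x', '_', 'm', 'e', 'd', 'i', 'a', 'n'] from by decide] at ht
      simp at ht
    · rw [show ("vmax_std" : String).toList = ['v', 'm', 'a', 'x', '_', 's', 't', 'd'] from by decide] at ht
      simp at ht
    · rw [show ("vmax_min" : String).toList = ['v', 'm', 'a', 'x', '_', 'm', 'i', 'n'] from by decide] at ht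
      simp at ht
    · rw [show ("vmax_max" : String).toList = ['v', 'm', 'a', 'x', '_', 'm', 'a', 'x'] from by decide] at ht
      simp at ht
  have hsplit : mySplit ('t' :: 'p' :: '_' :: r) = ['t', 'p'] :: mySplit r :=
    split1_eq ['t', 'p'] r (by decide)
  have hmem : (["mean", "median", "std", "min", "max"] : List String).contains (String.ofList r) = false := by
    cases hb : (["mean", "median", "std", "min", "max"] : List String).contains (String.ofList r) with
    | false => rfl
    | true =>
      exfalso
      have hm := List.mem_of_elem_eq_true hb
      simp only [List.mem_cons, List.not_mem_nil, or_false] at hm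
      rcases hm with h | h | h | h | h <;>
          have ht := congrArg String.toList h <;> simp only [String.toList_ofList] at ht
      · exact h1 ht
      · exact h2 ht
      · exact h3 ht
      · exact h4 ht
      · exact h5 ht
  rw [aKeyFun]
  rw [if_neg (by rw [hcont]; simp)]
  rw [if_pos (by rw [sw_tp r]; simp)]
  rw [pvCleanKey]
  rw [if_pos (sw_tp r)]
  rw [slice3, pvStrip]
  rw [if_neg (c := ((["mean", "median", "std", "min", "max"] : List String).contains (String.ofList r) = true)) (by rw [hmem]; simp)]
  rw [split?_ofList, hsplit, split?_ofList]
  simp [List.getD]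

theorem key_eq_vmax (r : List Char) :
    aKeyFun (String.ofList ('v' :: 'm' :: 'a' :: 'x' :: '_' :: r)) = pvCleanKey (String.ofList ('v' :: 'm' :: 'a' :: 'x' :: '_' :: r)) := by
  by_cases h1 : r = "mean".toList
  · subst h1; decide
  by_cases h2 : r = "median".toList
  · subst h2; decide
  by_cases h3 : r = "std".toList
  · subst h3; decide
  by_cases h4 : r = "min".toList
  · subst h4; decide
  by_cases h5 : r = "max".toList
  · subst h5; decide
  have hkeys : fieldMappings.keys = ["tp_mean", "tp_median", "tp_std", "tp_min", "tp_max", "vmax_mean", "vmax_median", "vmax_std", "vmax_min", "vmax_max"] := by decide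
  have hcont : fieldMappings.contains (String.ofList ('v' :: 'm' :: 'a' :: 'x' :: '_' :: r)) = false := by
    rw [PySem.Dict.contains_eq_decide_mem_keys, hkeys]
    simp only [List.mem_cons, List.not_mem_nil, or_false, decide_eq_false_iff_not, not_or]
    refine ⟨?_, ?_, ?_, ?_, ?_, ?_, ?_, ?_, ?_, ?_⟩ <;> intro h <;>
        have ht := congrArg String.toList h <;> simp only [String.toList_ofList] at ht
    · rw [show ("tp_mean" : String).toList = ['t', 'p', '_', 'm', 'e', 'a', 'n'] from by decide] at ht
      simp at ht
    · rw [show ("tp_median" : String).toList = ['t', 'p', '_', 'm', 'e', 'd', 'i', 'a', 'n'] from by decide] at ht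
      simp at ht
    · rw [show ("tp_std" : String).toList = ['t', 'p', '_', 's', 't', 'd'] from by decide] at ht
      simp at ht
    · rw [show ("tp_min" : String).toList = ['t', 'p', '_', 'm', 'i', 'n'] from by decide] at ht
      simp at ht
    · rw [show ("tp_max" : String).toList = ['t', 'p', '_', 'm', 'a', 'x'] from by decide] at ht
      simp at ht
    · rw [show ("vmax_mean" : String).toList = ['v', 'm', 'a', 'x', '_', 'm', 'e', 'a', 'n'] from by decide] at ht
      simp only [List.cons.injEq, true_and] at ht
      exact h1 (by rw [show ("mean" : String).toList = ['m', 'e', 'a', 'n'] from by decide]; exact ht)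
    · rw [show ("vmax_median" : String).toList = ['v', 'm', 'a', 'x', '_', 'm', 'e', 'd', 'i', 'a', 'n'] from by decide] at ht
      simp only [List.cons.injEq, true_and] at ht
      exact h2 (by rw [show ("median" : String).toList = ['m', 'e', 'd', 'i', 'a', 'n'] from by decide]; exact ht)
    · rw [show ("vmax_std" : String).toList = ['v', 'm', 'a', 'x', '_', 's', 't', 'd'] from by decide] at ht
      simp only [List.cons.injEq, true_and] at ht
      exact h3 (by rw [show ("std" : String).toList = ['s', 't', 'd'] from by decide]; exact ht)
    · rw [show ("vmax_min" : String).toList = ['v', 'm', 'a', 'x', '_', 'm', 'i', 'n'] from by decide] at ht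
      simp only [List.cons.injEq, true_and] at ht
      exact h4 (by rw [show ("min" : String).toList = ['m', 'i', 'n'] from by decide]; exact ht)
    · rw [show ("vmax_max" : String).toList = ['v', 'm', 'a', 'x', '_', 'm', 'a', 'x'] from by decide] at ht
      simp only [List.cons.injEq, true_and] at ht
      exact h5 (by rw [show ("max" : String).toList = ['m', 'a', 'x'] from by decide]; exact ht)
  have hsplit : mySplit ('v' :: 'm' :: 'a' :: 'x' :: '_' :: r) = ['v', 'm', 'a', 'x'] :: mySplit r :=
    split1_eq ['v', 'm', 'a', 'x'] r (by decide)
  have hmem : (["mean", "median", "std", "min", "max"] : List String).contains (String.ofList r) = false := by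
    cases hb : (["mean", "median", "std", "min", "max"] : List String).contains (String.ofList r) with
    | false => rfl
    | true =>
      exfalso
      have hm := List.mem_of_elem_eq_true hb
      simp only [List.mem_cons, List.not_mem_nil, or_false] at hm
      rcases hm with h | h | h | h | h <;>
          have ht := congrArg String.toList h <;> simp only [String.toList_ofList] at ht
      · exact h1 ht
      · exact h2 ht
      · exact h3 ht
      · exact h4 ht
      · exact h5 ht
  rw [aKeyFun]
  rw [if_neg (by rw [hcont]; simp)]
  rw [if_pos (by rw [sw_vmax r]; simp)]
  rw [pvCleanKey]
  rw [if_neg (c := (PySem.Str.startswith (String.ofList ('v' :: 'm' :: 'a' :: 'x' :: '_' :: r)) "tp_" = true)) (by rw [sw_tp_of_vmax r]; simp)]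
  rw [if_pos (sw_vmax r)]
  rw [slice5, pvStrip]
  rw [if_neg (c := ((["mean", "median", "std", "min", "max"] : List String).contains (String.ofList r) = true)) (by rw [hmem]; simp)]
  rw [split?_ofList, hsplit, split?_ofList]
  simp [List.getD]

theorem key_eq (k : String) : aKeyFun k = pvCleanKey k := by
  by_cases htp : PySem.Str.startswith k "tp_" = true
  · have h := htp
    simp only [PySem.Str.startswith, PySem.Chars.startswith] at h
    rw [show ("tp_" : String).toList = ['t', 'p', '_'] from by decide] at h
    obtain ⟨r, hr⟩ := (List.isPrefixOf_iff_prefix.mp h)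
    have hk : k = String.ofList ('t' :: 'p' :: '_' :: r) := by
      rw [show ('t' :: 'p' :: '_' :: r) = ['t', 'p', '_'] ++ r from rfl, hr]; simp
    rw [hk]; exact key_eq_tp r
  by_cases hvm : PySem.Str.startswith k "vmax_" = true
  · have h := hvm
    simp only [PySem.Str.startswith, PySem.Chars.startswith] at h
    rw [show ("vmax_" : String).toList = ['v', 'm', 'a', 'x', '_'] from by decide] at h
    obtain ⟨r, hr⟩ := (List.isPrefixOf_iff_prefix.mp h)
    have hk : k = String.ofList ('v' :: 'm' :: 'a' :: 'x' :: '_' :: r) := by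
      rw [show ('v' :: 'm' :: 'a' :: 'x' :: '_' :: r) = ['v', 'm', 'a', 'x', '_'] ++ r from rfl, hr]; simp
    rw [hk]; exact key_eq_vmax r
  -- no recognised prefix: both sides keep the key unchanged
  have htp' : PySem.Str.startswith k "tp_" = false := by
    cases hb : PySem.Str.startswith k "tp_" with
    | false => rfl
    | true => exact absurd hb htp
  have hvm' : PySem.Str.startswith k "vmax_" = false := by
    cases hb : PySem.Str.startswith k "vmax_" with
    | false => rfl
    | true => exact absurd hb hvm
  have hkeys : fieldMappings.keys = ["tp_mean", "tp_median", "tp_std", "tp_min", "tp_max",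
      "vmax_mean", "vmax_median", "vmax_std", "vmax_min", "vmax_max"] := by decide
  have hcont : fieldMappings.contains k = false := by
    cases hx : fieldMappings.contains k with
    | false => rfl
    | true =>
      exfalso
      have hm := (PySem.Dict.contains_iff_mem_keys fieldMappings k).mp hx
      rw [hkeys] at hm
      simp only [List.mem_cons, List.not_mem_nil, or_false] at hm
      rcases hm with h | h | h | h | h | h | h | h | h | h <;> subst h <;>
        first
        | exact absurd (by decide) htp
        | exact absurd (by decide) hvm
  rw [aKeyFun]
  rw [if_neg (by rw [hcont]; simp)]
  rw [if_neg (by rw [htp', hvm']; simp)]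
  rw [pvCleanKey]
  rw [if_neg (by rw [htp']; simp), if_neg (by rw [hvm']; simp)]

theorem fix_eq_aKey (statistics : List (String × List Int)) :
    fix_ensemble_statistics statistics =
      (statistics.foldl (fun d p => d.insert (aKeyFun p.1) p.2) PySem.Dict.empty).items := by
  unfold fix_ensemble_statistics
  congr 2
  funext d p
  simp only [aKeyFun]
  split_ifs <;> rfl

-- ===== VERDICT (by name: the statement is the Claim_ definition above) =====
theorem fix_ensemble_statistics_spec : Claim_equal_fix_ensemble_statistics := by
  intro statistics _
  unfold Spec_fix_ensemble_statistics
  rw [fix_eq_aKey]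
  unfold fix_ensemble_statistics_alt
  congr 2
  funext d p
  rw [key_eq]
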